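-- pv_equiv track=rewrite | github.com/eliottcassidy2000/math | 04-computation/reduced_poly_P.py | G_T_formula
-- ===== SOURCE A (Python) =====
-- from math import comb, factorial
--
-- def eulerian_number(n, k):
--     return sum((-1)**j * comb(n+1, j) * (k+1-j)**n for j in range(k+1))
--
-- def G_T_formula(n, inv_vals, t):
--     """Compute G_T(t, 2) via the OCF formula."""
--     d = n - 1
--     result = sum(eulerian_number(n, k) * t**k for k in range(n))
--     if n == 7:
--         invariants = [('t3', 4, 1), ('t5', 2, 1), ('t7', 0, 1), ('bc', 2, 2)]
--     elif n == 5: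
--         invariants = [('t3', 2, 1), ('t5', 0, 1)]
--     else:
--         return result
--     for name, f, parts in invariants:
--         val = inv_vals.get(name, 0)
--         if val == 0: continue
--         A_f1 = sum(eulerian_number(f+1, j) * t**j for j in range(f+1))
--         result += 2**parts * val * A_f1 * (t - 1)**(d - f)
--     return result
-- ===== SOURCE B (Python) =====
-- def _next_row(m, prev):
--     # Eulerian recurrence: A(m,k) = (k+1)*A(m-1,k) + (m-k)*A(m-1,k-1)
--     return [(k + 1) * (prev[k] if k < len(prev) else 0)
--             + (m - k) * (prev[k - 1] if k >= 1 else 0)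
--             for k in range(m)]
--
-- def _euler_row(m):
--     row = [1]
--     for i in range(1, m + 1):
--         row = _next_row(i, row)
--     return row
--
-- def _horner(coeffs, t):
--     acc = 0
--     for c in reversed(coeffs):
--         acc = acc * t + c
--     return acc
--
-- def G_T_formula(n, inv_vals, t):
--     """Compute G_T(t, 2) via the OCF formula (Eulerian triangle recurrence)."""
--     d = n - 1
--     if n == 7:
--         invariants = [('t3', 4, 1), ('t5', 2, 1), ('t7', 0, 1), ('bc', 2, 2)]
--     elif n == 5:
--         invariants = [('t3', 2, 1), ('t5', 0, 1)]
--     else: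
--         invariants = []
--     result = _horner(_euler_row(n), t) if n > 0 else 0
--     for name, f, parts in invariants:
--         val = inv_vals.get(name, 0)
--         if val:
--             result += 2 ** parts * val * _horner(_euler_row(f + 1), t) * (t - 1) ** (d - f)
--     return result
-- ===== Notes on version B (the rewrite author's own statement) =====
-- stated objective: alternative
-- what changed: B replaces per-coefficient evaluation of the closed-form alternating sum (comb and powers for every Eulerian number) by building Eulerian-triangle rows with the recurrence A(m,k)=(k+1)A(m-1,k)+(m-k)A(m-1,k-1) and evaluating the polynomials by Horner's rule.
import Mathlib
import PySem

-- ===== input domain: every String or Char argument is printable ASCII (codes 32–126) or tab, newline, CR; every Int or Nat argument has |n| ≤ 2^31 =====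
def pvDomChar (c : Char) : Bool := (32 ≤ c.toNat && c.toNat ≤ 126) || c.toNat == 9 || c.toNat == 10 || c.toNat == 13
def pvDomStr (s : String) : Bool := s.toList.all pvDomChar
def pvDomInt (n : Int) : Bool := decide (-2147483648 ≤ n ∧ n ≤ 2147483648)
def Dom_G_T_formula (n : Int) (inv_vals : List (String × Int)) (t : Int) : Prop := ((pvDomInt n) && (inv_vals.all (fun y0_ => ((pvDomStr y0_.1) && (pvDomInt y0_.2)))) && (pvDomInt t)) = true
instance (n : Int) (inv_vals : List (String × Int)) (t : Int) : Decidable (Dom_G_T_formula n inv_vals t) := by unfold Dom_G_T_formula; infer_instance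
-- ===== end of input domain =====

-- B builds the Eulerian triangle by its recurrence and evaluates by Horner instead of
-- summing the closed-form alternating expression per coefficient (objective: alternative).

-- ===== PORT A =====

-- inv_vals.get(name, 0): first-match lookup in the association list (shared by both ports)
def pvLookup (inv_vals : List (String × Int)) (name : String) : Int :=
  ((inv_vals.find? (fun p => p.1 == name)).map Prod.snd).getD 0

-- comb(n, k); exact for n, k ≥ 0, which holds at every call site of A
def pvComb (n k : Int) : Int := (Nat.choose n.toNat k.toNat : Int)

-- eulerian_number(n, k); exponents j, n, k are ≥ 0 at every call, so .toNat is exact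
def eulerianNumber (n k : Int) : Int :=
  (PySem.List.pyRange 0 (k + 1) 1).foldl
    (fun acc j => acc + (-1) ^ j.toNat * pvComb (n + 1) j * (k + 1 - j) ^ n.toNat) 0

-- the shared invariant loop of A ('for name, f, parts in invariants: …')
def aInvLoop (inv_vals : List (String × Int)) (d t : Int)
    (invariants : List (String × Int × Int)) (result : Int) : Int :=
  invariants.foldl (fun res item =>
    let val := pvLookup inv_vals item.1
    if val = 0 then res
    else
      let A_f1 := (PySem.List.pyRange 0 (item.2.1 + 1) 1).foldl
        (fun acc j => acc + eulerianNumber (item.2.1 + 1) j * t ^ j.toNat) 0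
      res + 2 ^ item.2.2.toNat * val * A_f1 * (t - 1) ^ (d - item.2.1).toNat) result

def G_T_formula (n : Int) (inv_vals : List (String × Int)) (t : Int) : Int :=
  let d := n - 1
  let result := (PySem.List.pyRange 0 n 1).foldl
    (fun acc k => acc + eulerianNumber n k * t ^ k.toNat) 0
  if n = 7 then
    aInvLoop inv_vals d t [("t3", 4, 1), ("t5", 2, 1), ("t7", 0, 1), ("bc", 2, 2)] result
  else if n = 5 then
    aInvLoop inv_vals d t [("t3", 2, 1), ("t5", 0, 1)] result
  else result

-- ===== PORT B =====

-- _next_row(m, prev); the guarded prev[k] / prev[k-1] are in range whenever read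
def nextRow (m : Int) (prev : List Int) : List Int :=
  (PySem.List.pyRange 0 m 1).map (fun k =>
    (k + 1) * (if k < (prev.length : Int) then (PySem.List.pyGetD prev k 0) else 0)
    + (m - k) * (if 1 ≤ k then (PySem.List.pyGetD prev (k - 1) 0) else 0))

-- _euler_row(m)
def eulerRowB (m : Int) : List Int :=
  (PySem.List.pyRange 1 (m + 1) 1).foldl (fun row i => nextRow i row) [1]

-- _horner(coeffs, t)
def horner (coeffs : List Int) (t : Int) : Int :=
  coeffs.reverse.foldl (fun acc c => acc * t + c) 0

def G_T_formula_alt (n : Int) (inv_vals : List (String × Int)) (t : Int) : Int :=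
  let d := n - 1
  let invariants : List (String × Int × Int) :=
    if n = 7 then [("t3", 4, 1), ("t5", 2, 1), ("t7", 0, 1), ("bc", 2, 2)]
    else if n = 5 then [("t3", 2, 1), ("t5", 0, 1)]
    else []
  let result := if 0 < n then horner (eulerRowB n) t else 0
  invariants.foldl (fun res item =>
    let val := pvLookup inv_vals item.1
    if val = 0 then res
    else res + 2 ^ item.2.2.toNat * val * horner (eulerRowB (item.2.1 + 1)) t
           * (t - 1) ^ (d - item.2.1).toNat) result

-- ===== PRECONDITION & SPEC =====
def Spec_G_T_formula (n : Int) (inv_vals : List (String × Int)) (t : Int) (out : Int) : Prop := out = G_T_formula_alt n inv_vals t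
instance (n : Int) (inv_vals : List (String × Int)) (t : Int) (out : Int) : Decidable (Spec_G_T_formula n inv_vals t out) := by unfold Spec_G_T_formula; infer_instance

-- ===== CLAIM (what is proved, stated in full; the proofs are below) =====
def Claim_equal_G_T_formula : Prop := ∀ (n : Int) (inv_vals : List (String × Int)) (t : Int), Dom_G_T_formula n inv_vals t → Spec_G_T_formula n inv_vals t (G_T_formula n inv_vals t)

-- ===== LEMMAS AND PROOFS =====

-- the mathematical closed form: E m k = Σ_{j≤k} (-1)^j C(m+1,j) (k+1-j)^m over ℤ
def Emath (m k : ℕ) : Int :=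
  ∑ j ∈ Finset.range (k + 1), (-1 : Int) ^ j * (Nat.choose (m + 1) j : Int) * ((k : Int) + 1 - j) ^ m

theorem Emath_zero_left (k : ℕ) (hk : 1 ≤ k) : Emath 0 k = 0 := by
  induction k with
  | zero => omega
  | succ k ih =>
    rcases Nat.eq_or_lt_of_le hk with h | h
    · simp [Emath, ← h, Finset.sum_range_succ]
    · have hk1 : 1 ≤ k := by omega
      have : Emath 0 (k + 1) = Emath 0 k + (-1 : Int) ^ (k+1) * (Nat.choose 1 (k+1) : Int) * 1 := by
        simp [Emath, Finset.sum_range_succ]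
      rw [this, ih hk1, Nat.choose_eq_zero_of_lt (by omega)]
      simp

theorem sum_split (F G H : ℕ → ℤ) (c d : ℤ) (n : ℕ)
    (h0 : F 0 = c * G 0)
    (hs : ∀ i, F (i+1) = c * G (i+1) + d * H i) :
    ∑ j ∈ Finset.range (n+1), F j = c * ∑ j ∈ Finset.range (n+1), G j + d * ∑ j ∈ Finset.range n, H j := by
  rw [Finset.sum_range_succ' F, Finset.sum_range_succ' G, h0]
  rw [mul_add, Finset.mul_sum, Finset.mul_sum]
  rw [add_right_comm ((Finset.range n).sum fun i => c * G (i+1)) (c * G 0)]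
  rw [← Finset.sum_add_distrib]
  congr 1
  exact Finset.sum_congr rfl (fun i _ => hs i)

theorem choose_key (m i : ℕ) : ((i:ℤ)+1) * ((m+1).choose (i+1) : ℤ) = ((m:ℤ)+1-i) * ((m+1).choose i : ℤ) := by
  by_cases hi : i ≤ m + 1
  · have h := Nat.choose_succ_right_eq (m+1) i
    have h2 : ((m + 1 - i : ℕ) : ℤ) = (m:ℤ) + 1 - i := by omega
    have := congrArg (fun x : ℕ => (x : ℤ)) h
    push_cast at this
    rw [h2] at this
    linarith [this]
  · rw [Nat.choose_eq_zero_of_lt (by omega : m+1 < i+1), Nat.choose_eq_zero_of_lt (by omega : m+1 < i)]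
    simp

theorem Emath_zero_right (m : ℕ) : Emath m 0 = 1 := by
  simp [Emath]

-- the Eulerian recurrence for the closed form
theorem Emath_rec (m k : ℕ) :
    Emath (m + 1) (k + 1) = ((k : Int) + 2) * Emath m (k + 1) + ((m : Int) - k) * Emath m k := by
  unfold Emath
  push_cast
  have hterm : ∀ i : ℕ, (-1:ℤ)^(i+1) * (((m+2).choose (i+1) : ℕ) : ℤ) * ((k:ℤ)+2-((i:ℤ)+1))^(m+1)
      = ((k:ℤ)+2) * ((-1:ℤ)^(i+1) * (((m+1).choose (i+1) : ℕ) : ℤ) * ((k:ℤ)+2-((i:ℤ)+1))^m)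
        + ((m:ℤ)-k) * ((-1:ℤ)^i * (((m+1).choose i : ℕ) : ℤ) * ((k:ℤ)+1-(i:ℤ))^m) := by
    intro i
    have pascal : (((m+2).choose (i+1) : ℕ) : ℤ) = ((m+1).choose i : ℤ) + ((m+1).choose (i+1) : ℤ) := by
      have : (m+2).choose (i+1) = (m+1).choose i + (m+1).choose (i+1) := Nat.choose_succ_succ (m+1) i
      push_cast [this]; ring
    have key := choose_key m i
    have he : (k:ℤ)+2-((i:ℤ)+1) = (k:ℤ)+1-i := by ring
    rw [he, pow_succ, pow_succ]
    linear_combination (-((-1:ℤ)^i) * (((k:ℤ)+1-i)^m) * ((k:ℤ)+1-i)) * pascal + (((-1:ℤ)^i) * (((k:ℤ)+1-i)^m)) * key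
  have h0 : (-1:ℤ)^(0:ℕ) * (((m+2).choose 0 : ℕ):ℤ) * ((k:ℤ)+2-(0:ℕ))^(m+1)
      = ((k:ℤ)+2) * ((-1:ℤ)^(0:ℕ) * (((m+1).choose 0 : ℕ):ℤ) * ((k:ℤ)+2-(0:ℕ))^m) := by
    simp [pow_succ]; ring
  exact sum_split (fun j => (-1:ℤ)^j * (((m+2).choose j : ℕ):ℤ) * ((k:ℤ)+2-j)^(m+1))
    (fun j => (-1:ℤ)^j * (((m+1).choose j : ℕ):ℤ) * ((k:ℤ)+2-j)^m)
    (fun j => (-1:ℤ)^j * (((m+1).choose j : ℕ):ℤ) * ((k:ℤ)+1-j)^m)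
    ((k:ℤ)+2) ((m:ℤ)-k) (k+1) h0 hterm

-- vanishing above the diagonal
theorem Emath_vanish (m k : ℕ) (hk : m ≤ k) (h1 : 1 ≤ k) : Emath m k = 0 := by
  induction m generalizing k with
  | zero => exact Emath_zero_left k h1
  | succ m ih =>
    obtain ⟨k', rfl⟩ : ∃ k', k = k' + 1 := ⟨k - 1, by omega⟩
    rw [Emath_rec]
    rw [ih (k'+1) (by omega) (by omega)]
    rcases Nat.eq_zero_or_pos k' with hk0 | hk0
    · subst hk0
      have hm : m = 0 := by omega
      subst hm
      simp
    · rw [ih k' (by omega) hk0]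
      ring

-- B's row m is the list of closed-form Eulerian numbers
-- getD on the row list: always the closed form (out of range = 0 = Emath there)
theorem getD_row (m i : ℕ) :
    ((List.range (max m 1)).map (fun k => Emath m k)).getD i 0 = Emath m i := by
  by_cases hi : i < max m 1
  · exact PySem.List.getD_map_range _ _ _ _ hi
  · rw [List.getD_eq_default _ _ (by simp only [List.length_map, List.length_range]; omega)]
    exact (Emath_vanish m i (by omega) (by omega)).symm

theorem eulerRowB_eq (m : ℕ) :
    eulerRowB (m : Int) = (List.range (max m 1)).map (fun k => Emath m k) := by
  induction m with
  | zero =>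
    unfold eulerRowB
    rw [PySem.List.pyRange_one_eq_nil (by norm_num)]
    simp [Emath_zero_right]
  | succ m ih =>
    have hstep : eulerRowB ((m+1 : ℕ) : Int) = nextRow ((m:Int) + 1) (eulerRowB (m : Int)) := by
      unfold eulerRowB
      have hc : ((m+1 : ℕ) : Int) + 1 = ((m:Int) + 1) + 1 := by push_cast; ring
      rw [hc, PySem.List.pyRange_one_succ_right (by omega), List.foldl_append]
      simp
    rw [hstep, ih]
    unfold nextRow
    have hmax : max (m+1) 1 = m + 1 := by omega
    rw [hmax]
    have hr : ((m:Int) + 1) = ((m+1 : ℕ) : Int) := by push_cast; ring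
    rw [hr, PySem.List.pyRange_zero_natCast, List.map_map]
    apply List.map_congr_left
    intro i hi
    have him : i < m + 1 := List.mem_range.mp hi
    show ((i:Int) + 1) * (if (i:Int) < _ then _ else 0) + (((m+1:ℕ):Int) - (i:Int)) * (if (1:Int) ≤ (i:Int) then _ else 0) = Emath (m+1) i
    rcases i with _ | i'
    · rw [if_pos (by simp), if_neg (by norm_num)]
      show (0 + 1) * PySem.List.pyGetD _ ((0:ℕ):Int) 0 + _ = _
      rw [PySem.List.pyGetD_natCast, getD_row, Emath_zero_right, Emath_zero_right]
      ring
    · have h1le : (1:Int) ≤ ((i'+1 : ℕ) : Int) := by push_cast; omega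
      have hlen : (((List.range (max m 1)).map (fun k => Emath m k)).length : Int) = (max m 1 : ℕ) := by simp
      have hfirst : (if ((i'+1:ℕ):Int) < (((List.range (max m 1)).map (fun k => Emath m k)).length : Int)
          then PySem.List.pyGetD ((List.range (max m 1)).map (fun k => Emath m k)) ((i'+1:ℕ):Int) 0 else 0) = Emath m (i'+1) := by
        split_ifs with h
        · rw [PySem.List.pyGetD_natCast, getD_row]
        · rw [hlen] at h
          exact (Emath_vanish m (i'+1) (by push_cast at h; omega) (by omega)).symm
      have hsub : ((i'+1:ℕ):Int) - 1 = ((i' : ℕ) : Int) := by push_cast; ring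
      rw [hfirst, if_pos h1le, hsub, PySem.List.pyGetD_natCast, getD_row]
      rw [Emath_rec]
      push_cast
      ring

-- Horner evaluates the coefficient list
theorem horner_eq_sum (l : List Int) (t : Int) :
    horner l t = ∑ i ∈ Finset.range l.length, l.getD i 0 * t ^ i := by
  unfold horner
  rw [List.foldl_reverse]
  induction l with
  | nil => simp
  | cons c tl ih =>
    rw [List.foldr_cons, ih]
    rw [List.length_cons, Finset.sum_range_succ']
    simp [Finset.sum_mul]
    ring_nf
    congr 1
    funext i
    ring

-- A's eulerian_number is the closed form
theorem eulerianNumber_eq (m k : ℕ) : eulerianNumber (m : Int) (k : Int) = Emath m k := by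
  unfold eulerianNumber Emath
  have h1 : ((k : Int) + 1) = ((k + 1 : ℕ) : Int) := by push_cast; ring
  rw [h1, PySem.List.pyRange_zero_natCast, PySem.List.foldl_add, List.map_map, zero_add]
  have hfun : ((fun j : Int => (-1:Int) ^ j.toNat * pvComb ((m:Int) + 1) j * (((k+1:ℕ):Int) - j) ^ ((m:Int)).toNat) ∘ fun i : ℕ => (i : Int))
      = fun j : ℕ => (-1:Int) ^ j * (Nat.choose (m+1) j : Int) * (((k+1:ℕ):Int) - (j:Int)) ^ m := by
    funext j
    simp [Function.comp, pvComb]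
  rw [hfun]
  rfl

-- A's polynomial sum equals B's Horner evaluation, for any order m ≥ 1
theorem sum_eq_horner (m : ℕ) (hm : 1 ≤ m) (t : Int) :
    (PySem.List.pyRange 0 (m : Int) 1).foldl
      (fun acc k => acc + eulerianNumber (m : Int) k * t ^ k.toNat) 0
      = horner (eulerRowB (m : Int)) t := by
  rw [PySem.List.pyRange_zero_natCast, PySem.List.foldl_add, List.map_map, zero_add]
  rw [eulerRowB_eq, horner_eq_sum]
  have hlen : ((List.range (max m 1)).map (fun k => Emath m k)).length = m := by
    simp only [List.length_map, List.length_range]; omega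
  rw [hlen]
  have hfun : ((fun k : Int => eulerianNumber (m:Int) k * t ^ k.toNat) ∘ fun i : ℕ => (i:Int))
      = fun k : ℕ => Emath m k * t ^ k := by
    funext k
    simp [Function.comp, eulerianNumber_eq]
  rw [hfun]
  rw [Finset.sum_congr rfl (fun i _ => by rw [getD_row])]
  rfl

-- ===== VERDICT (by name: the statement is the Claim_ definition above) =====
theorem G_T_formula_spec : Claim_equal_G_T_formula := by
  intro n iv t _
  unfold Spec_G_T_formula G_T_formula G_T_formula_alt aInvLoop
  have hitem : ∀ fv : Int, 0 ≤ fv →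
      (PySem.List.pyRange 0 (fv+1) 1).foldl (fun acc j => acc + eulerianNumber (fv+1) j * t ^ j.toNat) 0
        = horner (eulerRowB (fv+1)) t := by
    intro fv hfv
    have h : fv + 1 = ((fv.toNat + 1 : ℕ) : Int) := by omega
    rw [h]
    exact sum_eq_horner (fv.toNat + 1) (by omega) t
  have hmain : 0 < n →
      (PySem.List.pyRange 0 n 1).foldl (fun acc k => acc + eulerianNumber n k * t ^ k.toNat) 0
        = horner (eulerRowB n) t := by
    intro hn
    have h : n = ((n.toNat : ℕ) : Int) := by omega
    rw [h]
    exact sum_eq_horner n.toNat (by omega) t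
  have h5' := hitem 4 (by norm_num)
  have h3' := hitem 2 (by norm_num)
  have h1' := hitem 0 (by norm_num)
  norm_num at h5' h3' h1'
  by_cases h7 : n = 7
  · subst h7
    rw [if_pos rfl, if_pos rfl, hmain (by norm_num)]
    simp only [List.foldl_cons, List.foldl_nil]
    norm_num [h5', h3', h1']
  · by_cases h5 : n = 5
    · subst h5
      rw [if_neg (by norm_num), if_pos rfl, if_neg (by norm_num), if_pos rfl, hmain (by norm_num)]
      simp only [List.foldl_cons, List.foldl_nil]
      norm_num [h3', h1']
    · rw [if_neg h7, if_neg h5, if_neg h7, if_neg h5, List.foldl_nil]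
      by_cases hn : 0 < n
      · rw [if_pos hn, hmain hn]
      · rw [if_neg hn, PySem.List.pyRange_one_eq_nil (by omega), List.foldl_nil]
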